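-- pv_equiv track=rewrite | github.com/jz33/LeetCodeSolutions | T-1055 Shortest Way to Form String.py | shortestWay
-- ===== SOURCE A (Python) =====
-- from copy import deepcopy
--
-- def shortestWay(source: str, target: str) -> int:
--     '''
--     O(M+N) method
--     '''
--     # Preprocesing: build the index map on source.
--     # dp[i] is a {char : index} dict where index is the
--     # closest index of char which appears on i or later than i
--     sourceSize = len(source)
--     dp = [None] * sourceSize
--     dp[-1] = {source[-1] : sourceSize - 1}
--     for i in range(sourceSize-2, -1, -1):
--         dp[i] = deepcopy(dp[i+1])
--         dp[i][source[i]] = i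
--
--     i = sourceSize # iterater for dp (aka, source)
--     cycleCount = 0
--     for t in target:
--         # No appearance of t in source[i:],
--         # or i is at sourceSize,
--         # reset i to 0
--         if i == sourceSize or t not in dp[i]:
--             i = 0
--             cycleCount += 1
--
--         togo = dp[i].get(t)
--         if togo is None:
--             return -1
--
--         i = togo + 1
--     return cycleCount
-- ===== SOURCE B (Python) =====
-- from bisect import bisect_left
--
-- def shortestWay(source: str, target: str) -> int:
--     # Per-char sorted index lists + binary search: O(M + N log M), no deepcopy.
--     index = {}
--     for i, c in enumerate(source):
--         index.setdefault(c, []).append(i)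
--     if not target:
--         return 0
--     count = 1
--     pos = 0
--     for t in target:
--         if t not in index:
--             return -1
--         lst = index[t]
--         j = bisect_left(lst, pos)
--         if j == len(lst):
--             count += 1
--             j = 0
--         pos = lst[j] + 1
--     return count
-- ===== Notes on version B (the rewrite author's own statement) =====
-- stated objective: faster
-- what changed: B replaces A's preprocessing pass that deep-copies a next-occurrence dict for every source position by one pass building per-character sorted index lists, then answers each target character with bisect_left instead of dict chains.
import Mathlib
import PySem

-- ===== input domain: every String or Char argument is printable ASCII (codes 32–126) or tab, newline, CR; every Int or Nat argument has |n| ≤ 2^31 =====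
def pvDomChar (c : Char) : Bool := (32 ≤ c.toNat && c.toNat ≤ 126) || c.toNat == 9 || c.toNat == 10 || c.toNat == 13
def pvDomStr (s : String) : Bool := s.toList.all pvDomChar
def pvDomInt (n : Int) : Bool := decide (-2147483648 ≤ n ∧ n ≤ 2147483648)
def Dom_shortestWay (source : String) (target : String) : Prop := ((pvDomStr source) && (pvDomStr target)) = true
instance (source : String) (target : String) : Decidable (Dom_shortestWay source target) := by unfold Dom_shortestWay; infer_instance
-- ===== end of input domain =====

-- B replaces A's per-position deepcopy of a next-occurrence dict by per-char index lists
-- with binary search (bisect_left): same return value, no per-position dict copying.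

-- ===== PORT A =====
-- A's backward loop dp[i] = deepcopy(dp[i+1]); dp[i][source[i]] = i, with dp[-1] = {source[-1]: size-1},
-- as structural recursion from index i (calling with i = 0 yields the whole dp list).
def pvDpFromA : List Char → Int → List (PySem.Dict Char Int)
  | [], _ => []
  | [c], i => [PySem.Dict.empty.insert c i]
  | c :: c2 :: rest, i =>
      let tail := pvDpFromA (c2 :: rest) (i + 1)
      ((tail.headD PySem.Dict.empty).insert c i) :: tail

-- A's `for t in target` loop; state i (dp iterator) and cycleCount; early `return -1` kept.
def pvLoopA (dp : List (PySem.Dict Char Int)) (sourceSize : Int) :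
    List Char → Int → Int → Int
  | [], _, cycleCount => cycleCount
  | t :: ts, i, cycleCount =>
      let p : Int × Int :=
        if i = sourceSize ∨ ((PySem.List.pyGet? dp i).getD PySem.Dict.empty).contains t = false then
          (0, cycleCount + 1)
        else (i, cycleCount)
      match ((PySem.List.pyGet? dp p.1).getD PySem.Dict.empty).get? t with
      | none => -1
      | some togo => pvLoopA dp sourceSize ts (togo + 1) p.2

def shortestWay (source : String) (target : String) : Int :=
  let cs := source.toList
  let sourceSize : Int := cs.length
  let dp := pvDpFromA cs 0
  pvLoopA dp sourceSize target.toList sourceSize 0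

-- ===== PORT B =====
-- index.setdefault(c, []).append(i) over enumerate(source): dict of per-char index lists
def pvIndexB (cs : List Char) : PySem.Dict Char (List Int) :=
  (PySem.List.enumerate cs 0).foldl
    (fun d p => d.modify p.2 [] (fun l => l ++ [p.1])) PySem.Dict.empty

-- B's `for t in target` loop; state pos and count; early `return -1` kept.
def pvLoopB (index : PySem.Dict Char (List Int)) : List Char → Int → Int → Int
  | [], _, count => count
  | t :: ts, pos, count =>
      match index.get? t with
      | none => -1
      | some lst =>
          let j := PySem.List.bisectLeft lst pos
          if j = lst.length then pvLoopB index ts (lst.getD 0 0 + 1) (count + 1)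
          else pvLoopB index ts (lst.getD j 0 + 1) count

def shortestWay_alt (source : String) (target : String) : Int :=
  let index := pvIndexB source.toList
  if target.toList = [] then 0
  else pvLoopB index target.toList 0 1

-- ===== PRECONDITION & SPEC =====
-- Pre_ excludes only source = "": there Python A raises IndexError (dp[-1] = {...} on the empty
-- dp list) while B returns -1 for a non-empty target and 0 for an empty target.
def Pre_shortestWay (source : String) (target : String) : Prop := source ≠ ""
instance (source : String) (target : String) : Decidable (Pre_shortestWay source target) := by
  unfold Pre_shortestWay; infer_instance

def pvWitness_shortestWay : String × String := ("abab", "abba")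

def Spec_shortestWay (source : String) (target : String) (out : Int) : Prop :=
  out = shortestWay_alt source target
instance (source : String) (target : String) (out : Int) : Decidable (Spec_shortestWay source target out) := by
  unfold Spec_shortestWay; infer_instance

-- ===== CLAIM (what is proved, stated in full; the proofs are below) =====
def Claim_equal_shortestWay : Prop := ∀ (source : String) (target : String),
  Dom_shortestWay source target → Pre_shortestWay source target →
  Spec_shortestWay source target (shortestWay source target)

-- ===== LEMMAS AND PROOFS =====

-- the positions (as Ints) at which t occurs in cs, in increasing order
def pvOccs (cs : List Char) (t : Char) : List Int :=
  ((PySem.List.enumerate cs 0).filter (fun p => p.2 == t)).map (fun p => p.1)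

-- first occurrence of t in cs at a position ≥ k, as an offset into cs.drop k
def pvFirst (cs : List Char) (k : Nat) (t : Char) : Option Nat :=
  (cs.drop k).findIdx? (· == t)

theorem pv_mem_occs (cs : List Char) (t : Char) (v : Int) :
    v ∈ pvOccs cs t ↔ ∃ (k : Nat) (h : k < cs.length), cs[k] = t ∧ v = (k : Int) := by
  simp only [pvOccs, List.mem_map, List.mem_filter, PySem.List.mem_enumerate_iff]
  constructor
  · rintro ⟨p, ⟨⟨k, hk, rfl⟩, hpt⟩, rfl⟩
    exact ⟨k, hk, by simpa using hpt, by simp⟩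
  · rintro ⟨k, hk, hct, rfl⟩
    exact ⟨((k : Int), cs[k]), ⟨⟨k, hk, by simp⟩, by simpa using hct⟩, rfl⟩

theorem pv_occs_pairwise (cs : List Char) (t : Char) : (pvOccs cs t).Pairwise (· < ·) := by
  unfold pvOccs
  exact List.Pairwise.map _ (fun a b h => h) ((PySem.List.pairwise_lt_enumerate cs 0).filter _)

theorem pv_occs_nonneg (cs : List Char) (t : Char) : ∀ v ∈ pvOccs cs t, 0 ≤ v := by
  intro v hv
  obtain ⟨k, hk, -, rfl⟩ := (pv_mem_occs cs t v).1 hv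
  positivity

theorem pv_index_getD (cs : List Char) (t : Char) :
    (pvIndexB cs).getD t [] = pvOccs cs t := by
  unfold pvIndexB pvOccs
  have hfm : ((PySem.List.enumerate cs 0).map (fun p => (p.2, p.1))).foldl
      (fun (d : PySem.Dict Char (List Int)) (q : Char × Int) => d.modify q.1 [] (fun l => l ++ [q.2]))
      PySem.Dict.empty
      = (PySem.List.enumerate cs 0).foldl (fun d p => d.modify p.2 [] (fun l => l ++ [p.1]))
          PySem.Dict.empty := List.foldl_map
  rw [← hfm, PySem.Dict.getD_foldl_modify_append]
  simp [List.filter_map, List.map_map, Function.comp_def]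

theorem pv_index_contains (cs : List Char) (t : Char) :
    (pvIndexB cs).contains t = true ↔ t ∈ cs := by
  unfold pvIndexB
  rw [PySem.Dict.contains_iff_mem_keys,
      PySem.Dict.keys_foldl_modify_key (PySem.List.enumerate cs 0) (fun p => p.2) [] (fun _ p => (fun l => l ++ [p.1]))]
  simp [PySem.List.map_snd_enumerate]

theorem pv_index_get_none (cs : List Char) (t : Char) (h : t ∉ cs) :
    (pvIndexB cs).get? t = none := by
  rw [PySem.Dict.get?_eq_none_iff_contains]
  simp only [← Bool.not_eq_true, pv_index_contains]
  exact h

theorem pv_index_get_some (cs : List Char) (t : Char) (h : t ∈ cs) :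
    (pvIndexB cs).get? t = some (pvOccs cs t) := by
  have hc : (pvIndexB cs).contains t = true := (pv_index_contains cs t).2 h
  rw [PySem.Dict.contains_eq_isSome_get?] at hc
  obtain ⟨l, hl⟩ := Option.isSome_iff_exists.1 hc
  have := pv_index_getD cs t
  rw [PySem.Dict.getD_eq_get?_getD, hl] at this
  simp only [Option.getD_some] at this
  rw [hl, this]

theorem pv_first_mem (cs : List Char) (t : Char) :
    pvFirst cs 0 t = none ↔ t ∉ cs := by
  unfold pvFirst
  rw [List.drop_zero, List.findIdx?_eq_none_iff]
  constructor
  · intro h hm; simpa using h t hm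
  · intro h x hx
    by_cases hxt : x = t
    · exact absurd (hxt ▸ hx) h
    · simpa using hxt

theorem pv_bis_none (cs : List Char) (t : Char) (k : Nat) (h : pvFirst cs k t = none) :
    PySem.List.bisectLeft (pvOccs cs t) (k : Int) = (pvOccs cs t).length := by
  have hpw : (pvOccs cs t).Pairwise (· ≤ ·) :=
    (pv_occs_pairwise cs t).imp (fun h => le_of_lt h)
  obtain ⟨hle, hlt, hge⟩ := PySem.List.bisectLeft_spec (pvOccs cs t) (k : Int) hpw
  rcases Nat.lt_or_ge (PySem.List.bisectLeft (pvOccs cs t) (k : Int)) (pvOccs cs t).length with hb | hb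
  · exfalso
    have hgek := hge _ hb le_rfl
    have hmem : (pvOccs cs t)[PySem.List.bisectLeft (pvOccs cs t) (k : Int)] ∈ pvOccs cs t :=
      List.getElem_mem _
    obtain ⟨m, hm, hcm, hv⟩ := (pv_mem_occs cs t _).1 hmem
    rw [hv] at hgek
    have hmk : k ≤ m := by exact_mod_cast hgek
    have hdg : (cs.drop k)[m - k]? = some t := by
      rw [List.getElem?_drop, show k + (m - k) = m by omega, List.getElem?_eq_getElem hm, hcm]
    have hmem2 : t ∈ cs.drop k := List.mem_of_getElem? hdg
    unfold pvFirst at h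
    rw [List.findIdx?_eq_none_iff] at h
    simpa using h t hmem2
  · omega

theorem pv_bis_some (cs : List Char) (t : Char) (k j0 : Nat) (h : pvFirst cs k t = some j0) :
    PySem.List.bisectLeft (pvOccs cs t) (k : Int) < (pvOccs cs t).length ∧
    (pvOccs cs t).getD (PySem.List.bisectLeft (pvOccs cs t) (k : Int)) 0 = ((k + j0 : Nat) : Int) := by
  unfold pvFirst at h
  rw [List.findIdx?_eq_some_iff_getElem] at h
  obtain ⟨hj0, hpj0, hmin⟩ := h
  have hlen : k + j0 < cs.length := by
    have := hj0; rw [List.length_drop] at this; omega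
  have hct : cs[k + j0] = t := by
    have hd : (cs.drop k)[j0] = cs[k + j0] := List.getElem_drop
    rw [hd] at hpj0; exact by simpa using hpj0
  have hmemocc : ((k + j0 : Nat) : Int) ∈ pvOccs cs t :=
    (pv_mem_occs _ _ _).2 ⟨k + j0, hlen, hct, rfl⟩
  obtain ⟨p, hp, hpe⟩ := List.mem_iff_getElem.1 hmemocc
  have hpw : (pvOccs cs t).Pairwise (· ≤ ·) :=
    (pv_occs_pairwise cs t).imp (fun h => le_of_lt h)
  obtain ⟨hle, hlt, hge⟩ := PySem.List.bisectLeft_spec (pvOccs cs t) (k : Int) hpw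
  have hble : PySem.List.bisectLeft (pvOccs cs t) (k : Int) ≤ p := by
    by_contra hc
    push Not at hc
    have := hlt p hp hc
    rw [hpe] at this
    have : ((k + j0 : Nat) : Int) < (k : Int) := this
    push_cast at this; omega
  have hblt : PySem.List.bisectLeft (pvOccs cs t) (k : Int) < (pvOccs cs t).length :=
    lt_of_le_of_lt hble hp
  have hgeb := hge _ hblt le_rfl
  obtain ⟨m, hm, hcm, hvm⟩ := (pv_mem_occs cs t _).1 (List.getElem_mem hblt)
  rw [hvm] at hgeb
  have hkm : k ≤ m := by exact_mod_cast hgeb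
  have hmge : k + j0 ≤ m := by
    by_contra hc
    push Not at hc
    have hml : m - k < (cs.drop k).length := by rw [List.length_drop]; omega
    have hno := hmin (m - k) (by omega)
    apply hno
    have hd : (cs.drop k)[m - k]'hml = cs[m]'hm := by
      rw [List.getElem_drop]
      congr 1
      omega
    simp [hd, hcm]
  have hmon : (pvOccs cs t)[PySem.List.bisectLeft (pvOccs cs t) (k : Int)]'hblt ≤ (pvOccs cs t)[p]'hp := by
    rcases eq_or_lt_of_le hble with he | hl
    · exact le_of_eq (by congr 1)
    · exact le_of_lt (List.pairwise_iff_getElem.1 (pv_occs_pairwise cs t) _ p hblt hp hl)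
  rw [hvm, hpe] at hmon
  have hme : m = k + j0 := by
    have : (m : Int) ≤ ((k + j0 : Nat) : Int) := hmon
    push_cast at this; omega
  refine ⟨hblt, ?_⟩
  rw [List.getD_eq_getElem _ _ hblt, hvm, hme]

theorem pv_dp_cons (c : Char) (rest : List Char) (i : Int) :
    pvDpFromA (c :: rest) i =
      ((pvDpFromA rest (i + 1)).headD PySem.Dict.empty).insert c i :: pvDpFromA rest (i + 1) := by
  cases rest <;> rfl

theorem pv_dp_head (cs : List Char) (i0 : Int) (t : Char) :
    ((pvDpFromA cs i0).headD PySem.Dict.empty).get? t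
      = (cs.findIdx? (· == t)).map (fun j => i0 + (j : Int)) := by
  induction cs generalizing i0 with
  | nil => simp [pvDpFromA, PySem.Dict.get?_empty]
  | cons c rest ih =>
    rw [pv_dp_cons]
    simp only [List.headD_cons, List.findIdx?_cons]
    by_cases hct : (c == t) = true
    · have ht : t = c := by have := eq_of_beq hct; exact this.symm
      subst ht
      simp [PySem.Dict.get?_insert_self]
    · have hne : t ≠ c := fun he => hct (by simp [he])
      rw [PySem.Dict.get?_insert_of_ne _ _ hne, ih]
      simp only [hct]
      cases rest.findIdx? (· == t) with
      | none => simp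
      | some j => simp; ring

theorem pv_dp_drop (cs : List Char) (k : Nat) (i0 : Int) :
    (pvDpFromA cs i0).drop k = pvDpFromA (cs.drop k) (i0 + k) := by
  induction cs generalizing k i0 with
  | nil => simp [pvDpFromA]
  | cons c rest ih =>
    cases k with
    | zero => simp
    | succ k' =>
      rw [pv_dp_cons]
      simp only [List.drop_succ_cons]
      rw [ih k' (i0 + 1)]
      congr 1
      push_cast
      ring

theorem pv_lookupA (cs : List Char) (k : Nat) (t : Char) :
    ((PySem.List.pyGet? (pvDpFromA cs 0) (k : Int)).getD PySem.Dict.empty).get? t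
      = (pvFirst cs k t).map (fun j => ((k + j : Nat) : Int)) := by
  rw [PySem.List.pyGet?_natCast, ← List.head?_drop, pv_dp_drop]
  have hhd : ((pvDpFromA (cs.drop k) (0 + (k : Int))).head?.getD PySem.Dict.empty)
      = (pvDpFromA (cs.drop k) (0 + (k : Int))).headD PySem.Dict.empty := by
    cases pvDpFromA (cs.drop k) (0 + (k : Int)) <;> rfl
  rw [hhd, pv_dp_head]
  unfold pvFirst
  cases (cs.drop k).findIdx? (· == t) <;> simp


theorem pv_bis_zero (cs : List Char) (t : Char) (h : 0 < (pvOccs cs t).length) :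
    PySem.List.bisectLeft (pvOccs cs t) 0 = 0 := by
  have hpw : (pvOccs cs t).Pairwise (· ≤ ·) :=
    (pv_occs_pairwise cs t).imp (fun h => le_of_lt h)
  obtain ⟨hle, hlt, hge⟩ := PySem.List.bisectLeft_spec (pvOccs cs t) 0 hpw
  by_contra hc
  have h0 := hlt 0 h (Nat.pos_of_ne_zero fun he => hc (he ▸ rfl))
  exact absurd (pv_occs_nonneg cs t _ (List.getElem_mem h)) (by omega)

theorem pv_first_len (cs : List Char) (t : Char) : pvFirst cs cs.length t = none := by
  unfold pvFirst
  rw [List.drop_length]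
  rfl

theorem pv_loops_eq (cs : List Char) (ts : List Char) (k : Nat) (hk : k ≤ cs.length) (cc : Int) :
    pvLoopA (pvDpFromA cs 0) (cs.length : Int) ts (k : Int) cc
      = pvLoopB (pvIndexB cs) ts (k : Int) cc := by
  induction ts generalizing k cc with
  | nil => rfl
  | cons t ts ih =>
    have hlook := pv_lookupA cs k t
    cases hF : pvFirst cs k t with
    | some j0 =>
      rw [hF] at hlook
      simp only [Option.map_some] at hlook
      have hlen2 : k + j0 < cs.length := by
        unfold pvFirst at hF
        obtain ⟨h1, -, -⟩ := List.findIdx?_eq_some_iff_getElem.1 hF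
        rw [List.length_drop] at h1
        omega
      have hcontains : ((PySem.List.pyGet? (pvDpFromA cs 0) (k : Int)).getD PySem.Dict.empty).contains t = true := by
        rw [PySem.Dict.contains_eq_isSome_get?, hlook]
        rfl
      have hcond : ¬ ((k : Int) = (cs.length : Int) ∨
          ((PySem.List.pyGet? (pvDpFromA cs 0) (k : Int)).getD PySem.Dict.empty).contains t = false) := by
        rintro (h | h)
        · have : k = cs.length := by exact_mod_cast h
          omega
        · rw [hcontains] at h
          cases h
      have hmem : t ∈ cs := by
        have hlen' : k + j0 < cs.length := hlen2
        have hct : cs[k + j0] = t := by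
          unfold pvFirst at hF
          obtain ⟨h1, h2, -⟩ := List.findIdx?_eq_some_iff_getElem.1 hF
          have hd : (cs.drop k)[j0] = cs[k + j0] := List.getElem_drop
          rw [hd] at h2
          simpa using h2
        exact hct ▸ List.getElem_mem hlen'
      obtain ⟨hblt, hbgd⟩ := pv_bis_some cs t k j0 hF
      simp only [pvLoopA, pvLoopB, if_neg hcond, pv_index_get_some cs t hmem, hlook,
        if_neg (by omega : ¬ PySem.List.bisectLeft (pvOccs cs t) (k : Int) = (pvOccs cs t).length),
        hbgd]
      have hcast : ((k + j0 : Nat) : Int) + 1 = ((k + j0 + 1 : Nat) : Int) := by push_cast; ring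
      rw [hcast]
      exact ih (k + j0 + 1) (by omega) (cc)
    | none =>
      rw [hF] at hlook
      simp only [Option.map_none] at hlook
      have hcond : ((k : Int) = (cs.length : Int) ∨
          ((PySem.List.pyGet? (pvDpFromA cs 0) (k : Int)).getD PySem.Dict.empty).contains t = false) := by
        right
        rw [PySem.Dict.contains_eq_isSome_get?, hlook]
        rfl
      have hlook0 := pv_lookupA cs 0 t
      rw [Nat.cast_zero] at hlook0
      cases hF0 : pvFirst cs 0 t with
      | none =>
        rw [hF0] at hlook0
        simp only [Option.map_none] at hlook0
        have hnot : t ∉ cs := (pv_first_mem cs t).1 hF0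
        simp only [pvLoopA, pvLoopB, if_pos hcond, hlook0, pv_index_get_none cs t hnot]
      | some j1 =>
        rw [hF0] at hlook0
        simp only [Option.map_some, Nat.zero_add] at hlook0
        have hmem : t ∈ cs := by
          by_contra hnot
          rw [(pv_first_mem cs t).2 hnot] at hF0
          cases hF0
        have h0 := pv_bis_some cs t 0 j1 hF0
        rw [Nat.cast_zero] at h0
        have hb0 : PySem.List.bisectLeft (pvOccs cs t) 0 = 0 :=
          pv_bis_zero cs t (lt_of_le_of_lt (Nat.zero_le _) h0.1)
        have hgd : (pvOccs cs t).getD 0 0 = (j1 : Int) := by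
          have := h0.2
          rw [hb0] at this
          simpa using this
        have hj1 : j1 < cs.length := by
          unfold pvFirst at hF0
          obtain ⟨h1, -, -⟩ := List.findIdx?_eq_some_iff_getElem.1 hF0
          rw [List.length_drop] at h1
          omega
        simp only [pvLoopA, pvLoopB, if_pos hcond, hlook0, pv_index_get_some cs t hmem,
          if_pos (pv_bis_none cs t k hF), hgd]
        have : ((j1 : Nat) : Int) + 1 = ((j1 + 1 : Nat) : Int) := by push_cast; ring
        rw [this]
        exact ih (j1 + 1) (by omega) (cc + 1)

theorem pv_loopB_start (cs : List Char) (t : Char) (ts : List Char) :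
    pvLoopB (pvIndexB cs) (t :: ts) (cs.length : Int) 0
      = pvLoopB (pvIndexB cs) (t :: ts) 0 1 := by
  by_cases hmem : t ∈ cs
  · have hne : pvOccs cs t ≠ [] := by
      intro he
      obtain ⟨m, hm, hcm⟩ := List.mem_iff_getElem.1 hmem
      have : ((m : Nat) : Int) ∈ pvOccs cs t := (pv_mem_occs cs t _).2 ⟨m, hm, hcm, rfl⟩
      rw [he] at this
      cases this
    have hlen : 0 < (pvOccs cs t).length := List.length_pos_iff.2 hne
    have hF0 : pvFirst cs 0 t ≠ none := fun h => ((pv_first_mem cs t).1 h) hmem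
    obtain ⟨j1, hj1⟩ := Option.ne_none_iff_exists'.1 hF0
    have h0 := pv_bis_some cs t 0 j1 hj1
    rw [Nat.cast_zero] at h0
    have hb0 : PySem.List.bisectLeft (pvOccs cs t) 0 = 0 := pv_bis_zero cs t hlen
    simp only [pvLoopB, pv_index_get_some cs t hmem,
      if_pos (pv_bis_none cs t cs.length (pv_first_len cs t)), hb0,
      if_neg (by omega : ¬ (0 : Nat) = (pvOccs cs t).length)]
    norm_num
  · simp only [pvLoopB, pv_index_get_none cs t hmem]

-- ===== VERDICT (by name: the statement is the Claim_ definition above) =====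
theorem shortestWay_spec : Claim_equal_shortestWay := by
  unfold Claim_equal_shortestWay Spec_shortestWay
  intro source target _ _
  show shortestWay source target = shortestWay_alt source target
  unfold shortestWay shortestWay_alt
  cases htl : target.toList with
  | nil => rfl
  | cons t ts =>
    rw [if_neg (by simp)]
    have h := pv_loops_eq source.toList (t :: ts) source.toList.length le_rfl 0
    rw [h, pv_loopB_start]
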